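-- pv_equiv track=rewrite | github.com/AdamZhouSE/pythonHomework | Code/CodeRecords/2523/60797/303075.py | find
-- ===== SOURCE A (Python) =====
-- import collections
--
-- def find(d):
--
--     r, c = len(d), len(d[0])
--     data = collections.defaultdict(list)
--
--     for i in range(r):
--         for j in range(c):
--             data[i - j].append(d[i][j])
--
--     for i in data:
--         data[i].sort()
--
--     for i in range(r):
--         for j in range(c):
--             d[i][j] = data[i - j].pop(0)
--     return d
-- ===== SOURCE B (Python) =====
-- def find(d):
--     # Walk each diagonal (key i-j constant) directly: collect, sort, write back in place.
--     r, c = len(d), len(d[0])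
--     for k in range(-(c - 1), r):
--         i = max(0, k)
--         vals = []
--         while i < r and i - k < c:
--             vals.append(d[i][i - k])
--             i += 1
--         vals.sort()
--         i = max(0, k)
--         for v in vals:
--             d[i][i - k] = v
--             i += 1
--     return d
-- ===== Notes on version B (the rewrite author's own statement) =====
-- stated objective: simpler
-- what changed: Replaces the defaultdict grouping plus sort plus row-major pop(0) (three full passes with O(len) pops) by a direct walk of each diagonal: collect its values, sort, write them back along the same diagonal, with no auxiliary dict.
import Mathlib
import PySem

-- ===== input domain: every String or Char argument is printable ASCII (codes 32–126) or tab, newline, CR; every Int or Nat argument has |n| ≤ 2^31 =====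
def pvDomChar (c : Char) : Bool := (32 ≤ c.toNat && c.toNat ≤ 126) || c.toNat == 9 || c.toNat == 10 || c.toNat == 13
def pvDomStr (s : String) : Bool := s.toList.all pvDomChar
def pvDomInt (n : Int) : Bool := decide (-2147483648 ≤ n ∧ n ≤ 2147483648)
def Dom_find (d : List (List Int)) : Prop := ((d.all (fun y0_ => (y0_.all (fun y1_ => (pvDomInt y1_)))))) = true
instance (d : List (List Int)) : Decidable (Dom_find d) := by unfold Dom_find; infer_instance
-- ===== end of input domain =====

-- B sorts each diagonal in place by walking it twice instead of A's defaultdict + row-major pop(0);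
-- both Pythons mutate d in place and return it — the theorems below are about the RETURN value.

-- shared index primitives (d[i][j] read / d[i][j] = v write; indices are nonnegative and
-- in range on every admitted input, where these are exact)
def getCell (d : List (List Int)) (i j : Int) : Int :=
  PySem.List.pyGetD (PySem.List.pyGetD d i []) j 0

def setCell (d : List (List Int)) (i j : Int) (v : Int) : List (List Int) :=
  d.modify i.toNat (fun row => row.set j.toNat v)

-- ===== PORT A =====
def find (d : List (List Int)) : List (List Int) :=
  let r : Int := d.length
  let c : Int := ((PySem.List.pyGet? d 0).getD []).length
  let data : PySem.Dict Int (List Int) :=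
    (PySem.List.pyRange 0 r 1).foldl (fun D i =>
      (PySem.List.pyRange 0 c 1).foldl (fun D j =>
        D.insert (i - j) (D.getD (i - j) [] ++ [getCell d i j])) D) PySem.Dict.empty
  let data2 : PySem.Dict Int (List Int) :=
    data.keys.foldl (fun D k => D.insert k (PySem.List.sorted (D.getD k []) (fun x => x) false)) data
  let res :=
    (PySem.List.pyRange 0 r 1).foldl (fun (st : List (List Int) × PySem.Dict Int (List Int)) i =>
      (PySem.List.pyRange 0 c 1).foldl (fun st j =>
        let q := st.2.getD (i - j) []
        (setCell st.1 i j (q.headD 0), st.2.insert (i - j) q.tail)) st) (d, data2)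
  res.1

-- ===== PORT B =====
def collectDiag (r c : Int) (m : List (List Int)) (k : Int) (i : Int) : List Int :=
  if h : i < r ∧ i - k < c then
    getCell m i (i - k) :: collectDiag r c m k (i + 1)
  else []
termination_by (r - i).toNat
decreasing_by omega

def find_alt (d : List (List Int)) : List (List Int) :=
  let r : Int := d.length
  let c : Int := ((PySem.List.pyGet? d 0).getD []).length
  (PySem.List.pyRange (-(c - 1)) r 1).foldl (fun m k =>
    let vals := collectDiag r c m k (max 0 k)
    let vals := PySem.List.sorted vals (fun x => x) false
    (vals.foldl (fun (st : List (List Int) × Int) v =>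
        (setCell st.1 st.2 (st.2 - k) v, st.2 + 1)) (m, max 0 k)).1) d

-- ===== PRECONDITION & SPEC =====
-- Pre_ excludes exactly the inputs where the Python A raises IndexError: the empty list
-- (d[0]) and matrices with a row shorter than the first row (d[i][j] out of range).
def Pre_find (d : List (List Int)) : Prop :=
  d ≠ [] ∧ ∀ row ∈ d, (d.headD []).length ≤ row.length
instance (d : List (List Int)) : Decidable (Pre_find d) := by unfold Pre_find; infer_instance

def pvWitness_find : List (List Int) := [[3, 1], [2, 0]]

def Spec_find (d : List (List Int)) (out : List (List Int)) : Prop := out = find_alt d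
instance (d : List (List Int)) (out : List (List Int)) : Decidable (Spec_find d out) := by
  unfold Spec_find; infer_instance

-- ===== CLAIM (what is proved, stated in full; the proofs are below) =====
def Claim_equal_find : Prop := ∀ (d : List (List Int)), Dom_find d → Pre_find d → Spec_find d (find d)

-- ===== LEMMAS AND PROOFS =====

-- the number of columns / rows as the proofs use them
def nc (d : List (List Int)) : Int := (d.headD []).length
def nr (d : List (List Int)) : Int := d.length

-- the values of diagonal k of d (top to bottom); rows of diagonal k are max 0 k ≤ i < min r (k+c)
def diag (d : List (List Int)) (k : Int) : List Int :=
  (PySem.List.pyRange (max 0 k) (min (nr d) (k + nc d)) 1).map (fun i => getCell d i (i - k))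

-- the sorted diagonal
def sdiag (d : List (List Int)) (k : Int) : List Int :=
  PySem.List.sorted (diag d k) (fun x => x) false

-- final value of cell (i, j): its position along its diagonal is i - max 0 (i-j)
def cv (d : List (List Int)) (i j : Int) : Int :=
  (sdiag d (i - j)).getD (i - max 0 (i - j)).toNat 0

-- "m is d with every cell (i, j), j < c, satisfying R rewritten to its final value cv"
def Done (d m : List (List Int)) (R : Int → Int → Bool) : Prop :=
  m.length = d.length ∧
  ∀ i : Nat, i < d.length →
    (m.getD i []).length = (d.getD i []).length ∧
    ∀ j : Nat, j < (d.getD i []).length →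
      (m.getD i []).getD j 0 =
        if (j : Int) < nc d ∧ R i j = true then cv d (i : Int) (j : Int) else (d.getD i []).getD j 0


-- small bridges between Python indexing and List.getD
lemma getCell_eq_getD (d : List (List Int)) (i j : Int) (hi : 0 ≤ i) (hj : 0 ≤ j) :
    getCell d i j = (d.getD i.toNat []).getD j.toNat 0 := by
  unfold getCell
  rw [← Int.toNat_of_nonneg hi, ← Int.toNat_of_nonneg hj]
  simp only [PySem.List.pyGetD_natCast, Int.toNat_natCast]

lemma getD_modify_ne (m : List (List Int)) (n : Nat) (f : List Int → List Int) (i : Nat)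
    (hne : i ≠ n) : (m.modify n f).getD i [] = m.getD i [] := by
  simp [List.getD, Ne.symm hne]

lemma getD_modify_self (m : List (List Int)) (n : Nat) (f : List Int → List Int)
    (hn : n < m.length) : (m.modify n f).getD n [] = f (m.getD n []) := by
  simp [List.getD, List.getElem?_eq_getElem hn]

lemma getD_set_ne (l : List Int) (n : Nat) (v : Int) (i : Nat) (hne : i ≠ n) :
    (l.set n v).getD i 0 = l.getD i 0 := by
  simp [List.getD, List.getElem?_set_ne (Ne.symm hne)]

lemma getD_set_self (l : List Int) (n : Nat) (v : Int) (hn : n < l.length) :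
    (l.set n v).getD n 0 = v := by
  simp [List.getD, hn]

lemma headD_drop (l : List Int) (n : Nat) : (l.drop n).headD 0 = l.getD n 0 := by
  simp [List.headD_eq_head?_getD, List.head?_drop, List.getD]

lemma tail_drop' (l : List Int) (n : Nat) : (l.drop n).tail = l.drop (n + 1) := by
  rw [← List.drop_drop]
  simp

lemma c_port_eq (d : List (List Int)) (hd : d ≠ []) :
    (((PySem.List.pyGet? d 0).getD []).length : Int) = nc d := by
  cases d with
  | nil => exact absurd rfl hd
  | cons a l => simp [nc]

-- Done is unique in m
lemma done_unique {d m m' : List (List Int)} {R : Int → Int → Bool}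
    (h : Done d m R) (h' : Done d m' R) : m = m' := by
  obtain ⟨hl, he⟩ := h
  obtain ⟨hl', he'⟩ := h'
  apply List.ext_getElem (by omega)
  intro i h1 h2
  have hi : i < d.length := by omega
  obtain ⟨hml, hme⟩ := he i hi
  obtain ⟨hml', hme'⟩ := he' i hi
  have hgm : m.getD i [] = m[i] := List.getD_eq_getElem m [] h1
  have hgm' : m'.getD i [] = m'[i] := List.getD_eq_getElem m' [] h2
  rw [hgm] at hml hme
  rw [hgm'] at hml' hme'
  apply List.ext_getElem (by omega)
  intro j hj1 hj2
  have hjd : j < (d.getD i []).length := by omega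
  have e1 := hme j hjd
  have e2 := hme' j hjd
  rw [List.getD_eq_getElem _ 0 hj1] at e1
  rw [List.getD_eq_getElem _ 0 hj2] at e2
  rw [e1, e2]

-- the region only matters on in-range cells with j < c
lemma done_mono {d m : List (List Int)} {R R' : Int → Int → Bool} (h : Done d m R)
    (hR : ∀ i j : Nat, i < d.length → (j : Int) < nc d → j < (d.getD i []).length →
      R i j = R' i j) : Done d m R' := by
  obtain ⟨hl, he⟩ := h
  refine ⟨hl, fun i hi => ⟨(he i hi).1, fun j hj => ?_⟩⟩
  have e := (he i hi).2 j hj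
  by_cases hc : (j : Int) < nc d
  · rw [e, hR i j hi hc hj]
  · rw [e]
    simp only [hc, false_and, if_false]

lemma done_refl (d : List (List Int)) : Done d d (fun _ _ => false) := by
  exact ⟨rfl, fun i hi => ⟨rfl, fun j hj => by simp⟩⟩

-- reading a cell of a Done matrix
lemma done_getCell {d m : List (List Int)} {R : Int → Int → Bool} (h : Done d m R)
    {i j : Int} (hi0 : 0 ≤ i) (hir : i < d.length) (hj0 : 0 ≤ j)
    (hjrow : j < ((d.getD i.toNat []).length : Int)) :
    getCell m i j =
      if j < nc d ∧ R i j = true then cv d i j else getCell d i j := by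
  obtain ⟨hl, he⟩ := h
  have hiN : i.toNat < d.length := by omega
  obtain ⟨hml, hme⟩ := he i.toNat hiN
  have hjN : j.toNat < (d.getD i.toNat []).length := by omega
  have e := hme j.toNat hjN
  rw [getCell_eq_getD m i j hi0 hj0, getCell_eq_getD d i j hi0 hj0, e]
  rw [Int.toNat_of_nonneg hi0, Int.toNat_of_nonneg hj0]

-- writing the final value of an in-range cell grows the region by that cell
lemma setCell_done {d m : List (List Int)} {R : Int → Int → Bool} (h : Done d m R)
    {i j : Int} (hi0 : 0 ≤ i) (_hir : i < d.length) (hj0 : 0 ≤ j) (hjc : j < nc d)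
    (_hjrow : j < ((d.getD i.toNat []).length : Int)) :
    Done d (setCell m i j (cv d i j))
      (fun i' j' => R i' j' || decide (i' = i ∧ j' = j)) := by
  obtain ⟨hl, he⟩ := h
  constructor
  · simp [setCell, hl]
  · intro i' hi'
    obtain ⟨hml, hme⟩ := he i' hi'
    by_cases hii : i' = i.toNat
    · have hi'm : i' < m.length := by omega
      constructor
      · unfold setCell
        rw [hii, getD_modify_self m i.toNat _ (by omega), ← hii]
        simpa [List.getD] using hml
      · intro j' hj'
        unfold setCell
        rw [hii, getD_modify_self m i.toNat _ (by omega), ← hii]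
        by_cases hjj : j' = j.toNat
        · rw [hjj] at hj' ⊢
          rw [getD_set_self _ _ _ (by omega)]
          have h1 : ((j.toNat : Int)) = j := by omega
          have h2 : ((i' : Int)) = i := by omega
          rw [h1, h2]
          simp [hjc]
        · rw [getD_set_ne _ _ _ _ hjj]
          rw [hme j' hj']
          have : ¬((j' : Int) = j) := by omega
          simp only [this, and_false, decide_false, Bool.or_false]
    · constructor
      · unfold setCell
        rw [getD_modify_ne m i.toNat _ i' hii]
        exact hml
      · intro j' hj'
        unfold setCell
        rw [getD_modify_ne m i.toNat _ i' hii]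
        rw [hme j' hj']
        have : ¬((i' : Int) = i) := by omega
        simp only [this, false_and, decide_false, Bool.or_false]

-- shared facts
lemma or_decide (p q : Prop) [Decidable p] [Decidable q] :
    (decide p || decide q) = decide (p ∨ q) := by
  by_cases hp : p <;> by_cases hq : q <;> simp [hp, hq]

lemma row_len (d : List (List Int)) (hp : Pre_find d) (i : Nat) (hi : i < d.length) :
    nc d ≤ ((d.getD i []).length : Int) := by
  have hm : d.getD i [] ∈ d := by
    rw [List.getD_eq_getElem d [] hi]
    exact List.getElem_mem hi
  have := hp.2 _ hm
  unfold nc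
  omega

lemma sdiag_length (d : List (List Int)) (K : Int) :
    (sdiag d K).length = (min (nr d) (K + nc d) - max 0 K).toNat := by
  unfold sdiag diag
  rw [PySem.List.length_sorted, List.length_map, PySem.List.length_pyRange_one]

-- ---- A-side ----


-- region for A: all cells before (I, J) in row-major order are done
def RA (I J : Int) : Int → Int → Bool := fun i j => decide (i < I ∨ (i = I ∧ j < J))

-- how many cells of diagonal k precede (I, J) in row-major order
def cntA (c I J k : Int) : Nat :=
  (min I (k + c) - max 0 k).toNat + (if 0 ≤ I - k ∧ I - k < J then 1 else 0)

-- phase-3 invariant on the dict: every queue is the corresponding sorted diagonal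
-- with the already popped prefix removed
def DictInv (d : List (List Int)) (D : PySem.Dict Int (List Int)) (I J : Int) : Prop :=
  ∀ k : Int, D.getD k [] = (sdiag d k).drop (cntA (nc d) I J k)

lemma phase1_inner (d : List (List Int)) (c i k : Int) :
    ∀ (n : Nat) (a : Int) (D : PySem.Dict Int (List Int)), 0 ≤ a → c ≤ a + n →
    ((PySem.List.pyRange a c 1).foldl
        (fun D j => D.insert (i - j) (D.getD (i - j) [] ++ [getCell d i j])) D).getD k []
      = D.getD k [] ++
        (if a ≤ i - k ∧ i - k < c then [getCell d i (i - k)] else []) := by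
  intro n
  induction n with
  | zero =>
    intro a D ha hn
    rw [PySem.List.pyRange_one_eq_nil (by omega), List.foldl_nil]
    rw [if_neg (by omega)]
    simp
  | succ n ih =>
    intro a D ha hn
    by_cases hac : c ≤ a
    · rw [PySem.List.pyRange_one_eq_nil (by omega), List.foldl_nil]
      rw [if_neg (by omega)]
      simp
    · rw [PySem.List.pyRange_one_cons (by omega), List.foldl_cons]
      rw [ih (a + 1) _ (by omega) (by omega)]
      by_cases hk : k = i - a
      · rw [if_neg (by omega)]
        have h1 : i - a = k := by omega
        rw [h1, PySem.Dict.getD_insert_self]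
        rw [if_pos (by omega)]
        have h2 : i - k = a := by omega
        rw [h2]
        simp
      · rw [PySem.Dict.getD_insert_of_ne _ _ _ (by omega)]
        by_cases hcond : a + 1 ≤ i - k ∧ i - k < c
        · rw [if_pos hcond, if_pos (by omega)]
        · rw [if_neg hcond, if_neg (by omega)]

lemma phase1_outer (d : List (List Int)) (c : Int) (hc0 : 0 ≤ c) :
    ∀ (t : Nat) (k : Int),
    ((PySem.List.pyRange 0 (t : Int) 1).foldl
        (fun D i => (PySem.List.pyRange 0 c 1).foldl
          (fun D j => D.insert (i - j) (D.getD (i - j) [] ++ [getCell d i j])) D)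
        PySem.Dict.empty).getD k []
      = (PySem.List.pyRange (max 0 k) (min (t : Int) (k + c)) 1).map
          (fun i => getCell d i (i - k)) := by
  intro t
  induction t with
  | zero =>
    intro k
    rw [PySem.List.pyRange_one_eq_nil (a := 0) (b := ((0 : Nat) : Int)) (by omega), List.foldl_nil]
    rw [PySem.List.pyRange_one_eq_nil (a := max 0 k) (b := min ((0 : Nat) : Int) (k + c)) (by omega),
      List.map_nil, PySem.Dict.getD_empty]
  | succ t ih =>
    intro k
    have hcast : ((t + 1 : Nat) : Int) = (t : Int) + 1 := by push_cast; ring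
    rw [hcast, PySem.List.pyRange_one_succ_right (by omega), List.foldl_append,
      List.foldl_cons, List.foldl_nil]
    rw [phase1_inner d c (t : Int) k (c + 1).toNat 0 _ (by omega) (by omega)]
    rw [ih k]
    by_cases hcond : 0 ≤ (t : Int) - k ∧ (t : Int) - k < c
    · rw [if_pos (by omega)]
      have h1 : min ((t : Int) + 1) (k + c) = (t : Int) + 1 := by omega
      have h2 : min ((t : Int)) (k + c) = (t : Int) := by omega
      rw [h1, h2, PySem.List.pyRange_one_succ_right (by omega), List.map_append]
      simp
    · rw [if_neg (by omega)]
      have h1 : min ((t : Int) + 1) (k + c) = min ((t : Int)) (k + c) ∨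
          ((min ((t : Int) + 1) (k + c) ≤ max 0 k) ∧ (min ((t : Int)) (k + c) ≤ max 0 k)) := by
        omega
      rcases h1 with h1 | ⟨h1, h2⟩
      · rw [h1]
        simp
      · rw [PySem.List.pyRange_one_eq_nil h1, PySem.List.pyRange_one_eq_nil h2]
        simp

lemma phase1_nodup (d : List (List Int)) (c : Int) (l : List Int) :
    ∀ (D : PySem.Dict Int (List Int)), D.keys.Nodup →
    (l.foldl (fun D i => (PySem.List.pyRange 0 c 1).foldl
        (fun D j => D.insert (i - j) (D.getD (i - j) [] ++ [getCell d i j])) D) D).keys.Nodup := by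
  induction l with
  | nil => intro D h; exact h
  | cons i t ih =>
    intro D h
    rw [List.foldl_cons]
    exact ih _ (PySem.Dict.nodup_keys_foldl_insert_key _ (fun j => i - j)
      (fun D j => D.getD (i - j) [] ++ [getCell d i j]) D h)

lemma phase2 (ks : List Int) (hnd : ks.Nodup) :
    ∀ (D : PySem.Dict Int (List Int)) (k : Int),
    ((ks.foldl (fun D k => D.insert k (PySem.List.sorted (D.getD k []) (fun x => x) false)) D).getD k [])
      = if k ∈ ks then PySem.List.sorted (D.getD k []) (fun x => x) false else D.getD k [] := by
  induction ks with
  | nil => intro D k; simp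
  | cons k0 t ih =>
    intro D k
    obtain ⟨hk0, hndt⟩ := List.nodup_cons.mp hnd
    rw [List.foldl_cons, ih hndt]
    by_cases hk : k = k0
    · subst hk
      rw [if_neg hk0, if_pos (by simp), PySem.Dict.getD_insert_self]
    · rw [PySem.Dict.getD_insert_of_ne _ _ _ hk]
      by_cases hmem : k ∈ t
      · rw [if_pos hmem, if_pos (by simp [hmem])]
      · rw [if_neg hmem, if_neg (by simp [hk, hmem])]

-- after phases 1 and 2 the dict maps every key to its sorted diagonal
lemma data2_getD (d : List (List Int)) (k : Int) (hc0 : 0 ≤ nc d) :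
    (((PySem.List.pyRange 0 (d.length : Int) 1).foldl
        (fun D i => (PySem.List.pyRange 0 (nc d) 1).foldl
          (fun D j => D.insert (i - j) (D.getD (i - j) [] ++ [getCell d i j])) D)
        PySem.Dict.empty).keys.foldl
          (fun D k => D.insert k (PySem.List.sorted (D.getD k []) (fun x => x) false))
          ((PySem.List.pyRange 0 (d.length : Int) 1).foldl
            (fun D i => (PySem.List.pyRange 0 (nc d) 1).foldl
              (fun D j => D.insert (i - j) (D.getD (i - j) [] ++ [getCell d i j])) D)
            PySem.Dict.empty)).getD k []
      = sdiag d k := by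
  have hrange : PySem.List.pyRange 0 (d.length : Int) 1 =
      (PySem.List.pyRange 0 ((d.length : Nat) : Int) 1) := rfl
  have h1 : ∀ k : Int, ((PySem.List.pyRange 0 (d.length : Int) 1).foldl
      (fun D i => (PySem.List.pyRange 0 (nc d) 1).foldl
        (fun D j => D.insert (i - j) (D.getD (i - j) [] ++ [getCell d i j])) D)
      PySem.Dict.empty).getD k [] = diag d k := by
    intro k
    exact phase1_outer d (nc d) hc0 d.length k
  have hnd := phase1_nodup d (nc d) (PySem.List.pyRange 0 (d.length : Int) 1)
    PySem.Dict.empty PySem.Dict.nodup_keys_empty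
  rw [phase2 _ hnd, h1 k]
  by_cases hmem : k ∈ (((PySem.List.pyRange 0 (d.length : Int) 1).foldl
      (fun D i => (PySem.List.pyRange 0 (nc d) 1).foldl
        (fun D j => D.insert (i - j) (D.getD (i - j) [] ++ [getCell d i j])) D)
      PySem.Dict.empty)).keys
  · rw [if_pos hmem]
    rfl
  · rw [if_neg hmem]
    have hcf : (((PySem.List.pyRange 0 (d.length : Int) 1).foldl
        (fun D i => (PySem.List.pyRange 0 (nc d) 1).foldl
          (fun D j => D.insert (i - j) (D.getD (i - j) [] ++ [getCell d i j])) D)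
        PySem.Dict.empty)).contains k = false := by
      rw [PySem.Dict.contains_eq_decide_mem_keys]
      simp [hmem]
    have hdk : diag d k = [] := by
      rw [← h1 k]
      exact PySem.Dict.getD_of_not_contains _ ([] : List Int) hcf
    rw [hdk]
    unfold sdiag
    rw [hdk]
    rfl

lemma cntA_succ_self (c I J : Int) (hJ0 : 0 ≤ J) (hJc : J < c) (hI0 : 0 ≤ I) :
    cntA c I (J + 1) (I - J) = cntA c I J (I - J) + 1 := by
  unfold cntA
  split_ifs <;> omega

lemma cntA_succ_ne (c I J k : Int) (hk : k ≠ I - J) :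
    cntA c I (J + 1) k = cntA c I J k := by
  unfold cntA
  split_ifs <;> omega

lemma cntA_pos (c I J : Int) (hJ0 : 0 ≤ J) (hJc : J < c) :
    cntA c I J (I - J) = (I - max 0 (I - J)).toNat := by
  unfold cntA
  rw [if_neg (by omega)]
  omega

lemma cntA_row (c I k : Int) (hI0 : 0 ≤ I) :
    cntA c I c k = cntA c (I + 1) 0 k := by
  unfold cntA
  split_ifs <;> omega

lemma a_inner (d : List (List Int)) (hp : Pre_find d) (I : Int) (hI0 : 0 ≤ I)
    (hIr : I < (d.length : Int)) :
    ∀ (n : Nat) (J : Int) (st : List (List Int) × PySem.Dict Int (List Int)),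
    0 ≤ J → J ≤ nc d → nc d ≤ J + n →
    Done d st.1 (RA I J) → DictInv d st.2 I J →
    Done d (((PySem.List.pyRange J (nc d) 1).foldl
        (fun st j => (setCell st.1 I j ((st.2.getD (I - j) []).headD 0),
          st.2.insert (I - j) ((st.2.getD (I - j) []).tail))) st).1) (RA I (nc d)) ∧
    DictInv d (((PySem.List.pyRange J (nc d) 1).foldl
        (fun st j => (setCell st.1 I j ((st.2.getD (I - j) []).headD 0),
          st.2.insert (I - j) ((st.2.getD (I - j) []).tail))) st).2) I (nc d) := by
  intro n
  induction n with
  | zero =>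
    intro J st hJ0 hJle hn hm hD
    have hJ : J = nc d := by omega
    subst hJ
    rw [PySem.List.pyRange_one_eq_nil (a := nc d) (b := nc d) le_rfl]
    exact ⟨hm, hD⟩
  | succ n ih =>
    intro J st hJ0 hJle hn hm hD
    by_cases hJc : nc d ≤ J
    · have hJ : J = nc d := by omega
      subst hJ
      rw [PySem.List.pyRange_one_eq_nil (a := nc d) (b := nc d) le_rfl]
      exact ⟨hm, hD⟩
    · push_neg at hJc
      rw [PySem.List.pyRange_one_cons (a := J) (b := nc d) (by omega), List.foldl_cons]
      have hq : st.2.getD (I - J) [] = (sdiag d (I - J)).drop (cntA (nc d) I J (I - J)) := hD _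
      have hv : (st.2.getD (I - J) []).headD 0 = cv d I J := by
        rw [hq, headD_drop, cntA_pos _ _ _ hJ0 hJc]
        rfl
      have hrl := row_len d hp I.toNat (by omega)
      have hstep := setCell_done hm (i := I) (j := J) hI0 hIr hJ0 hJc (by omega)
      have hm' : Done d (setCell st.1 I J ((st.2.getD (I - J) []).headD 0)) (RA I (J + 1)) := by
        rw [hv]
        refine done_mono hstep ?_
        intro i j hi hj hjr
        unfold RA
        rw [or_decide]
        exact decide_eq_decide.mpr (by omega)
      have hD' : DictInv d (st.2.insert (I - J) ((st.2.getD (I - J) []).tail)) I (J + 1) := by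
        intro k
        by_cases hk : k = I - J
        · subst hk
          rw [PySem.Dict.getD_insert_self, hq, tail_drop',
            cntA_succ_self _ _ _ hJ0 hJc hI0]
        · rw [PySem.Dict.getD_insert_of_ne _ _ _ hk, hD k, cntA_succ_ne _ _ _ _ hk]
      exact ih (J + 1) _ (by omega) (by omega) (by omega) hm' hD'

lemma a_outer (d : List (List Int)) (hp : Pre_find d) :
    ∀ (n : Nat) (I : Int) (st : List (List Int) × PySem.Dict Int (List Int)),
    0 ≤ I → (d.length : Int) ≤ I + n →
    Done d st.1 (RA I 0) → DictInv d st.2 I 0 →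
    Done d (((PySem.List.pyRange I (d.length : Int) 1).foldl
        (fun st i => (PySem.List.pyRange 0 (nc d) 1).foldl
          (fun st j => (setCell st.1 i j ((st.2.getD (i - j) []).headD 0),
            st.2.insert (i - j) ((st.2.getD (i - j) []).tail))) st) st).1)
      (RA (d.length : Int) 0) := by
  intro n
  induction n with
  | zero =>
    intro I st hI0 hn hm hD
    rw [PySem.List.pyRange_one_eq_nil (a := I) (b := (d.length : Int)) (by omega), List.foldl_nil]
    refine done_mono hm ?_
    intro i j hi hj hjr
    unfold RA
    exact decide_eq_decide.mpr (by omega)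
  | succ n ih =>
    intro I st hI0 hn hm hD
    by_cases hIr : (d.length : Int) ≤ I
    · rw [PySem.List.pyRange_one_eq_nil (a := I) (b := (d.length : Int)) (by omega), List.foldl_nil]
      refine done_mono hm ?_
      intro i j hi hj hjr
      unfold RA
      exact decide_eq_decide.mpr (by omega)
    · push_neg at hIr
      rw [PySem.List.pyRange_one_cons (a := I) (b := (d.length : Int)) (by omega), List.foldl_cons]
      have hc0 : 0 ≤ nc d := by unfold nc; omega
      obtain ⟨hm1, hD1⟩ := a_inner d hp I hI0 hIr (nc d).toNat 0 st le_rfl hc0 (by omega)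
        (by
          refine done_mono hm ?_
          intro i j hi hj hjr
          rfl) hD
      refine ih (I + 1) _ (by omega) (by omega) ?_ ?_
      · refine done_mono hm1 ?_
        intro i j hi hj hjr
        unfold RA
        exact decide_eq_decide.mpr (by omega)
      · intro k
        rw [hD1 k, cntA_row _ _ _ hI0]

set_option maxHeartbeats 2000000 in
lemma find_done (d : List (List Int)) (hp : Pre_find d) :
    Done d (find d) (fun _ _ => true) := by
  have hd : d ≠ [] := hp.1
  have hr1 : 1 ≤ d.length := by
    cases d with
    | nil => exact absurd rfl hd
    | cons a l => simp
  have hc : (((PySem.List.pyGet? d 0).getD []).length : Int) = nc d := c_port_eq d hd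
  have hc0 : 0 ≤ nc d := by unfold nc; omega
  unfold find
  simp only [hc]
  have h0 : Done d d (RA 0 0) := by
    refine done_mono (done_refl d) ?_
    intro i j hi hj hjr
    unfold RA
    exact (decide_eq_false (by omega)).symm
  have hD0 : DictInv d
      (((PySem.List.pyRange 0 (d.length : Int) 1).foldl
        (fun D i => (PySem.List.pyRange 0 (nc d) 1).foldl
          (fun D j => D.insert (i - j) (D.getD (i - j) [] ++ [getCell d i j])) D)
        PySem.Dict.empty).keys.foldl
          (fun D k => D.insert k (PySem.List.sorted (D.getD k []) (fun x => x) false))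
          ((PySem.List.pyRange 0 (d.length : Int) 1).foldl
            (fun D i => (PySem.List.pyRange 0 (nc d) 1).foldl
              (fun D j => D.insert (i - j) (D.getD (i - j) [] ++ [getCell d i j])) D)
            PySem.Dict.empty)) 0 0 := by
    intro k
    rw [data2_getD d k hc0]
    have : cntA (nc d) 0 0 k = 0 := by unfold cntA; split_ifs <;> omega
    rw [this, List.drop_zero]
  have hfin := a_outer d hp d.length 0
    (d, ((PySem.List.pyRange 0 (d.length : Int) 1).foldl
        (fun D i => (PySem.List.pyRange 0 (nc d) 1).foldl
          (fun D j => D.insert (i - j) (D.getD (i - j) [] ++ [getCell d i j])) D)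
        PySem.Dict.empty).keys.foldl
          (fun D k => D.insert k (PySem.List.sorted (D.getD k []) (fun x => x) false))
          ((PySem.List.pyRange 0 (d.length : Int) 1).foldl
            (fun D i => (PySem.List.pyRange 0 (nc d) 1).foldl
              (fun D j => D.insert (i - j) (D.getD (i - j) [] ++ [getCell d i j])) D)
            PySem.Dict.empty)) le_rfl (by omega) h0 hD0
  refine done_mono hfin ?_
  intro i j hi hj hjr
  unfold RA
  exact decide_eq_true (by omega)

-- ---- B-side ----

-- regions for B: all diagonals with key < K done; partial: diagonal K done down to row max 0 K + p
def RB (K : Int) : Int → Int → Bool := fun i j => decide (i - j < K)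
def RP (K : Int) (p : Nat) : Int → Int → Bool :=
  fun i j => decide (i - j < K) || decide (i - j = K ∧ i < max 0 K + p)

lemma collectDiag_eq (r c : Int) (m : List (List Int)) (k : Int) (i : Int) :
    collectDiag r c m k i =
      (PySem.List.pyRange i (min r (k + c)) 1).map (fun i' => getCell m i' (i' - k)) := by
  fun_induction collectDiag r c m k i with
  | case1 i h ih =>
    rw [PySem.List.pyRange_one_cons (by omega), List.map_cons, ih]
  | case2 i h =>
    rw [PySem.List.pyRange_one_eq_nil (by omega), List.map_nil]

lemma collect_eq_diag (d : List (List Int)) (hp : Pre_find d) (K : Int) (m : List (List Int))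
    (h : Done d m (RB K)) :
    collectDiag (nr d) (nc d) m K (max 0 K) = diag d K := by
  rw [collectDiag_eq]
  unfold diag
  apply List.map_congr_left
  intro i hi
  rw [PySem.List.mem_pyRange_one] at hi
  have hnrd : nr d = (d.length : Int) := rfl
  have hrl := row_len d hp i.toNat (by omega)
  rw [done_getCell h (by omega) (by omega) (by omega) (by omega)]
  have : RB K i (i - K) = false := by unfold RB; simp
  rw [this]
  simp

lemma write_loop (d : List (List Int)) (hp : Pre_find d) (K : Int) :
    ∀ (n : Nat) (p : Nat) (m : List (List Int)), (sdiag d K).length ≤ p + n →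
    Done d m (RP K p) →
    Done d ((((sdiag d K).drop p).foldl
        (fun (st : List (List Int) × Int) v => (setCell st.1 st.2 (st.2 - K) v, st.2 + 1))
        (m, max 0 K + p)).1)
      (RP K (sdiag d K).length) := by
  intro n
  induction n with
  | zero =>
    intro p m hlen hm
    rw [List.drop_of_length_le (by omega)]
    refine done_mono hm ?_
    intro i j hi hj hjr
    have hL := sdiag_length d K
    have hnrd : nr d = (d.length : Int) := rfl
    unfold RP
    rw [or_decide, or_decide]
    exact decide_eq_decide.mpr (by omega)
  | succ n ih =>
    intro p m hlen hm
    by_cases hpl : (sdiag d K).length ≤ p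
    · rw [List.drop_of_length_le (by omega)]
      refine done_mono hm ?_
      intro i j hi hj hjr
      have hL := sdiag_length d K
      have hnrd : nr d = (d.length : Int) := rfl
      unfold RP
      rw [or_decide, or_decide]
      exact decide_eq_decide.mpr (by omega)
    · push_neg at hpl
      have hL := sdiag_length d K
      have hdrop : (sdiag d K).drop p = (sdiag d K)[p] :: (sdiag d K).drop (p + 1) :=
        (List.getElem_cons_drop hpl).symm
      rw [hdrop, List.foldl_cons]
      have hnrd : nr d = (d.length : Int) := rfl
      have hir : max 0 K + (p : Int) < (d.length : Int) := by omega
      have hjc : max 0 K + (p : Int) - K < nc d := by omega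
      have hv : (sdiag d K)[p] = cv d (max 0 K + p) (max 0 K + p - K) := by
        unfold cv
        have h1 : max 0 K + (p : Int) - (max 0 K + (p : Int) - K) = K := by omega
        rw [h1]
        have h2 : (max 0 K + (p : Int) - max 0 K).toNat = p := by omega
        rw [h2, List.getD_eq_getElem _ 0 hpl]
      have hrl := row_len d hp (max 0 K + (p : Int)).toNat (by omega)
      have step := setCell_done hm (i := max 0 K + (p : Int)) (j := max 0 K + (p : Int) - K)
        (by omega) (by omega) (by omega) hjc (by omega)
      have hstep2 : Done d (setCell m (max 0 K + (p : Int)) (max 0 K + (p : Int) - K)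
          (cv d (max 0 K + (p : Int)) (max 0 K + (p : Int) - K))) (RP K (p + 1)) := by
        refine done_mono step ?_
        intro i j hi hj hjr
        unfold RP
        rw [or_decide, or_decide, or_decide]
        exact decide_eq_decide.mpr (by push_cast; omega)
      have hrec := ih (p + 1) _ (by omega) hstep2
      rw [hv]
      have hc : max 0 K + (p : Int) + 1 = max 0 K + (((p + 1) : Nat) : Int) := by push_cast; ring
      rw [hc]
      exact hrec

lemma b_outer (d : List (List Int)) (hp : Pre_find d) :
    ∀ (n : Nat) (K : Int) (m : List (List Int)), nr d ≤ K + n → Done d m (RB K) →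
    Done d ((PySem.List.pyRange K (nr d) 1).foldl (fun m k =>
        ((PySem.List.sorted (collectDiag (nr d) (nc d) m k (max 0 k)) (fun x => x) false).foldl
          (fun (st : List (List Int) × Int) v => (setCell st.1 st.2 (st.2 - k) v, st.2 + 1))
          (m, max 0 k)).1) m)
      (RB (nr d)) := by
  intro n
  induction n with
  | zero =>
    intro K m hK hm
    rw [PySem.List.pyRange_one_eq_nil (by omega), List.foldl_nil]
    refine done_mono hm ?_
    intro i j hi hj hjr
    have hnrd : nr d = (d.length : Int) := rfl
    unfold RB
    exact decide_eq_decide.mpr (by omega)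
  | succ n ih =>
    intro K m hK hm
    by_cases hKr : nr d ≤ K
    · rw [PySem.List.pyRange_one_eq_nil (by omega), List.foldl_nil]
      refine done_mono hm ?_
      intro i j hi hj hjr
      have hnrd : nr d = (d.length : Int) := rfl
      unfold RB
      exact decide_eq_decide.mpr (by omega)
    · push_neg at hKr
      rw [PySem.List.pyRange_one_cons (by omega), List.foldl_cons]
      rw [collect_eq_diag d hp K m hm]
      have hsd : PySem.List.sorted (diag d K) (fun x => x) false = sdiag d K := rfl
      rw [hsd]
      have hm0 : Done d m (RP K 0) := by
        refine done_mono hm ?_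
        intro i j hi hj hjr
        unfold RB RP
        rw [or_decide]
        exact decide_eq_decide.mpr (by push_cast; omega)
      have hw := write_loop d hp K (sdiag d K).length 0 m (by omega) hm0
      simp only [List.drop_zero] at hw
      have hc0 : max 0 K + ((0 : Nat) : Int) = max 0 K := by simp
      rw [hc0] at hw
      refine ih (K + 1) _ (by omega) (done_mono hw ?_)
      intro i j hi hj hjr
      have hL := sdiag_length d K
      have hnrd : nr d = (d.length : Int) := rfl
      unfold RP RB
      rw [or_decide]
      exact decide_eq_decide.mpr (by omega)

lemma find_alt_done (d : List (List Int)) (hp : Pre_find d) :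
    Done d (find_alt d) (fun _ _ => true) := by
  have hd : d ≠ [] := hp.1
  have hr1 : 1 ≤ d.length := by
    cases d with
    | nil => exact absurd rfl hd
    | cons a l => simp
  have hc : (((PySem.List.pyGet? d 0).getD []).length : Int) = nc d := c_port_eq d hd
  have hnc0 : 0 ≤ nc d := by unfold nc; omega
  unfold find_alt
  rw [hc]
  have h0 : Done d d (RB (-(nc d - 1))) := by
    refine done_mono (done_refl d) ?_
    intro i j hi hj hjr
    unfold RB
    exact (decide_eq_false (by omega)).symm
  have hb := b_outer d hp (nr d + nc d).toNat (-(nc d - 1)) d (by unfold nr; omega) h0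
  refine done_mono hb ?_
  intro i j hi hj hjr
  have hnrd : nr d = (d.length : Int) := rfl
  unfold RB
  exact decide_eq_true (by omega)

-- ===== VERDICT (by name: the statement is the Claim_ definition above) =====
theorem find_spec : Claim_equal_find := by
  intro d _ hp
  unfold Spec_find
  exact done_unique (find_done d hp) (find_alt_done d hp)
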